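-- pv_equiv track=rewrite | github.com/ekukura/hackkerrank | _algorithms/implementation/flatland-space-stations.py | flatlandSpaceStations
-- ===== SOURCE A (Python) =====
-- import math
--
-- def flatlandSpaceStations(n, c):
--     sorted_stations = sorted(c)
--     first_endpoint_dist = sorted_stations[0]
--     last_endpoint_dist = n-sorted_stations[-1]-1
--     max_end_dist = max(first_endpoint_dist, last_endpoint_dist)
--     if len(sorted_stations) > 1:
--         middle_distances = [sorted_stations[i]-sorted_stations[i-1] for i in range(1,len(sorted_stations))]
--         longest_mid = math.floor(max(middle_distances)/2)
--         max_dist = max(longest_mid, max_end_dist)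
--     else:
--         max_dist = max_end_dist
--
--     return max_dist
-- ===== SOURCE B (Python) =====
-- def flatlandSpaceStations(n, c):
--     best = max(min(c), n - max(c) - 1)
--     if len(c) > 1:
--         for s in c:
--             nxt = min((t for t in c if t > s), default=s)
--             best = max(best, (nxt - s) // 2)
--     return best
-- ===== Notes on version B (the rewrite author's own statement) =====
-- stated objective: alternative
-- what changed: B drops the sort and the consecutive-gap comprehension: it takes min/max of c directly for the endpoint distances and, when there are at least two stations, scans each station for its nearest strictly-larger station to get the halved gaps (O(k^2) scan instead of O(k log k) sort); Pre_ excludes only c = [], where A raises IndexError (B raises ValueError there too).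
import Mathlib
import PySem

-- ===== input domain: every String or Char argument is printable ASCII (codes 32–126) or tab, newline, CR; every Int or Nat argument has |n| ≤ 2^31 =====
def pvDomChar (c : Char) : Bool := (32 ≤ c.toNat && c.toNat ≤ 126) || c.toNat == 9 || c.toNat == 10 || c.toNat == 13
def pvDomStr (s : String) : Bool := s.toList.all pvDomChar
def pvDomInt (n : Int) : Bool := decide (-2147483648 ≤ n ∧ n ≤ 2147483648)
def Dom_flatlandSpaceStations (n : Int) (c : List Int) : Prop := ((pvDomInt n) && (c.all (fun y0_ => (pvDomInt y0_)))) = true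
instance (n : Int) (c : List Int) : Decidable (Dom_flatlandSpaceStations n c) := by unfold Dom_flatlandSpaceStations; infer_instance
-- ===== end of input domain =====

-- B replaces A's sort + consecutive-gap comprehension by a sort-free nearest-larger-station
-- scan (objective: alternative, no speed claim); return value only, neither side mutates c.

-- ===== PORT A =====
-- Literal port of A. math.floor(max(middle_distances)/2) is exact integer floor division for
-- the |value| ≤ 2^31 ints admitted by Dom_, ported as PySem.Int.floordiv _ 2.
def flatlandSpaceStations (n : Int) (c : List Int) : Int :=
  let sorted_stations := PySem.List.sorted c (fun x => x) false
  match PySem.List.pyGet? sorted_stations 0, PySem.List.pyGet? sorted_stations (-1) with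
  | some first_endpoint_dist, some last_station =>
    let last_endpoint_dist := n - last_station - 1
    let max_end_dist := max first_endpoint_dist last_endpoint_dist
    if 1 < sorted_stations.length then
      let middle_distances := (PySem.List.pyRange 1 (sorted_stations.length : Int) 1).map
        (fun i => PySem.List.pyGetD sorted_stations i 0 - PySem.List.pyGetD sorted_stations (i - 1) 0)
      let longest_mid := PySem.Int.floordiv ((PySem.List.max? middle_distances (fun x => x)).getD 0) 2
      max longest_mid max_end_dist
    else max_end_dist
  | _, _ => 0  -- c = []: Python raises IndexError; excluded by Pre_

-- ===== PORT B =====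
def flatlandSpaceStations_alt (n : Int) (c : List Int) : Int :=
  let best := max ((PySem.List.min? c (fun x => x)).getD 0)
                  (n - (PySem.List.max? c (fun x => x)).getD 0 - 1)
  if 1 < c.length then
    c.foldl (fun b s =>
      let nxt := (PySem.List.min? (c.filter (fun t => s < t)) (fun x => x)).getD s
      max b (PySem.Int.floordiv (nxt - s) 2)) best
  else best

-- ===== PRECONDITION & SPEC =====
-- Pre_ excludes exactly c = [], where Python A raises IndexError (B raises ValueError there too).
def Pre_flatlandSpaceStations (n : Int) (c : List Int) : Prop := c ≠ []
instance (n : Int) (c : List Int) : Decidable (Pre_flatlandSpaceStations n c) := by unfold Pre_flatlandSpaceStations; infer_instance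
def pvWitness_flatlandSpaceStations : Int × List Int := (5, [0, 4])
def Spec_flatlandSpaceStations (n : Int) (c : List Int) (out : Int) : Prop := out = flatlandSpaceStations_alt n c
instance (n : Int) (c : List Int) (out : Int) : Decidable (Spec_flatlandSpaceStations n c out) := by unfold Spec_flatlandSpaceStations; infer_instance

-- ===== CLAIM (what is proved, stated in full; the proofs are below) =====
def Claim_equal_flatlandSpaceStations : Prop := ∀ (n : Int) (c : List Int), Dom_flatlandSpaceStations n c → Pre_flatlandSpaceStations n c → Spec_flatlandSpaceStations n c (flatlandSpaceStations n c)

-- ===== LEMMAS AND PROOFS =====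

-- B's per-station gap value: half the distance from s to the nearest strictly larger station
-- (0 when none exists, via the default).
def pvGap (c : List Int) (s : Int) : Int :=
  PySem.Int.floordiv (((PySem.List.min? (c.filter (fun t => s < t)) (fun x => x)).getD s) - s) 2

-- foldl-of-max facts
theorem foldl_max_init_le (g : Int → Int) (l : List Int) (b : Int) :
    b ≤ l.foldl (fun b s => max b (g s)) b := by
  induction l generalizing b with
  | nil => simp
  | cons x t ih => exact le_trans (le_max_left _ _) (ih _)

theorem foldl_max_mem_le (g : Int → Int) (l : List Int) (b : Int) {s : Int} (hs : s ∈ l) :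
    g s ≤ l.foldl (fun b s => max b (g s)) b := by
  induction l generalizing b with
  | nil => cases hs
  | cons x t ih =>
    rcases List.mem_cons.1 hs with h | h
    · subst h; exact le_trans (le_max_right _ _) (foldl_max_init_le _ _ _)
    · exact ih (max b (g x)) h

theorem foldl_max_cases (g : Int → Int) (l : List Int) (b : Int) :
    l.foldl (fun b s => max b (g s)) b = b ∨ ∃ s ∈ l, l.foldl (fun b s => max b (g s)) b = g s := by
  induction l generalizing b with
  | nil => left; rfl
  | cons x t ih =>
    have hc : List.foldl (fun b s => max b (g s)) b (x :: t)
        = List.foldl (fun b s => max b (g s)) (max b (g x)) t := rfl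
    rcases ih (max b (g x)) with h | ⟨s, hs, h⟩
    · rcases max_choice b (g x) with hm | hm
      · left; rw [hc, h, hm]
      · right; exact ⟨x, List.mem_cons_self, by rw [hc, h, hm]⟩
    · right; exact ⟨s, List.mem_cons_of_mem _ hs, by rw [hc, h]⟩

-- min?/max? value characterisations
theorem min_getD_eq {c : List Int} {m : Int} (hmem : m ∈ c) (hmin : ∀ y ∈ c, m ≤ y) (d : Int) :
    (PySem.List.min? c (fun x => x) ).getD d = m := by
  cases hm : PySem.List.min? c (fun x => x) with
  | none =>
    rw [PySem.List.min?_eq_none_iff] at hm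
    subst hm; cases hmem
  | some m' =>
    have h1 := PySem.List.min?_mem hm
    have h2 := PySem.List.min?_isMin hm m hmem
    exact le_antisymm h2 (hmin m' h1)

theorem max_getD_eq {c : List Int} {m : Int} (hmem : m ∈ c) (hmax : ∀ y ∈ c, y ≤ m) (d : Int) :
    (PySem.List.max? c (fun x => x) ).getD d = m := by
  cases hm : PySem.List.max? c (fun x => x) with
  | none =>
    rw [PySem.List.max?_eq_none_iff] at hm
    subst hm; cases hmem
  | some m' =>
    have h1 := PySem.List.max?_mem hm
    have h2 := PySem.List.max?_isMax hm m hmem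
    exact le_antisymm (hmax m' h1) h2

-- sorted list: adjacent pair straddling s (least index above s)
theorem exists_adjacent_straddle {l : List Int} (hp : l.Pairwise (· ≤ ·)) {s y : Int}
    (hy : y ∈ l) (hys : s < y) (hs : ∃ x ∈ l, x ≤ s) :
    ∃ k, k + 1 < l.length ∧ l[k]! ≤ s ∧ s < l[k+1]! := by
  have hmono : ∀ i j, ∀ hi : i < l.length, ∀ hj : j < l.length, i ≤ j → l[i] ≤ l[j] := by
    intro i j hi hj hij
    rcases eq_or_lt_of_le hij with rfl | hlt
    · exact le_refl _
    · exact (List.pairwise_iff_getElem.1 hp) i j hi hj hlt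
  obtain ⟨iy, hiy, hiyv⟩ := List.mem_iff_getElem.1 hy
  have hex : ∃ q, q < l.length ∧ s < l[q]! :=
    ⟨iy, hiy, by rw [getElem!_pos l iy hiy, hiyv]; exact hys⟩
  obtain ⟨hqlen, hqv⟩ := Nat.find_spec hex
  obtain ⟨x, hx, hxs⟩ := hs
  obtain ⟨ix, hix, hixv⟩ := List.mem_iff_getElem.1 hx
  have hq1 : 1 ≤ Nat.find hex := by
    by_contra h0
    have hz : Nat.find hex = 0 := by omega
    rw [hz] at hqv hqlen
    rw [getElem!_pos l 0 hqlen] at hqv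
    have : l[0] ≤ x := by rw [← hixv]; exact hmono 0 ix hqlen hix (Nat.zero_le _)
    omega
  refine ⟨Nat.find hex - 1, by omega, ?_, ?_⟩
  · have hlt : Nat.find hex - 1 < Nat.find hex := by omega
    have hmin := Nat.find_min hex hlt
    have hklen : Nat.find hex - 1 < l.length := by omega
    rw [getElem!_pos l _ hklen]
    by_contra hc
    exact hmin ⟨hklen, by rw [getElem!_pos l _ hklen]; omega⟩
  · have : Nat.find hex - 1 + 1 = Nat.find hex := by omega
    rw [this]
    exact hqv

theorem fd2_mono {a b : Int} (hab : a ≤ b) : PySem.Int.floordiv a 2 ≤ PySem.Int.floordiv b 2 := by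
  rw [PySem.Int.floordiv_eq_ediv_of_pos (by norm_num), PySem.Int.floordiv_eq_ediv_of_pos (by norm_num)]
  exact Int.ediv_le_ediv (by norm_num) hab

-- main equality
theorem pv_main (n : Int) (c : List Int) (h : c ≠ []) :
    flatlandSpaceStations n c = flatlandSpaceStations_alt n c := by
  have hperm := PySem.List.sorted_perm c (fun x : Int => x) false
  set ss := PySem.List.sorted c (fun x : Int => x) false with hssdef
  have hpw : ss.Pairwise (· ≤ ·) := PySem.List.sorted_pairwise c (fun x => x)
  have hsne : ss ≠ [] := by
    intro e
    rw [e] at hperm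
    exact h hperm.symm.eq_nil
  have hlpos : 0 < ss.length := List.length_pos_of_ne_nil hsne
  have hlen : ss.length = c.length := hperm.length_eq
  have hmemiff : ∀ y : Int, y ∈ ss ↔ y ∈ c := fun y => hperm.mem_iff
  have hmono : ∀ i j, i < ss.length → j < ss.length → i ≤ j → ss[i]! ≤ ss[j]! := by
    intro i j hi hj hij
    rw [getElem!_pos ss i hi, getElem!_pos ss j hj]
    rcases eq_or_lt_of_le hij with rfl | hlt
    · exact le_refl _
    · exact (List.pairwise_iff_getElem.1 hpw) i j hi hj hlt
  have hmemidx : ∀ y : Int, y ∈ c → ∃ i, ∃ hi : i < ss.length, ss[i]! = y := by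
    intro y hy
    obtain ⟨i, hi, hv⟩ := List.mem_iff_getElem.1 ((hmemiff y).2 hy)
    exact ⟨i, hi, by rw [getElem!_pos ss i hi]; exact hv⟩
  have hidxmem : ∀ i, i < ss.length → ss[i]! ∈ c := by
    intro i hi
    rw [getElem!_pos ss i hi]
    exact (hmemiff _).1 (List.getElem_mem hi)
  have hminv : ∀ y ∈ c, ss[0]! ≤ y := by
    intro y hy
    obtain ⟨i, hi, hv⟩ := hmemidx y hy
    rw [← hv]; exact hmono 0 i hlpos hi (Nat.zero_le _)
  have hmaxv : ∀ y ∈ c, y ≤ ss[ss.length - 1]! := by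
    intro y hy
    obtain ⟨i, hi, hv⟩ := hmemidx y hy
    rw [← hv]; exact hmono i (ss.length - 1) hi (by omega) (by omega)
  have hminD : (PySem.List.min? c (fun x => x)).getD 0 = ss[0]! :=
    min_getD_eq (hidxmem 0 hlpos) hminv 0
  have hmaxD : (PySem.List.max? c (fun x => x)).getD 0 = ss[ss.length - 1]! :=
    max_getD_eq (hidxmem _ (by omega)) hmaxv 0
  have hget0 : PySem.List.pyGet? ss 0 = some ss[0]! := by
    rw [PySem.List.pyGet?_zero, getElem!_pos ss 0 hlpos]
    exact List.getElem?_eq_getElem hlpos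
  have hgetN : PySem.List.pyGet? ss (-1) = some ss[ss.length - 1]! := by
    rw [PySem.List.pyGet?_neg_one, getElem!_pos ss _ (by omega : ss.length - 1 < ss.length),
      List.getLast?_eq_some_getLast hsne]
    congr 1
    exact List.getLast_eq_getElem hsne
  unfold flatlandSpaceStations flatlandSpaceStations_alt
  rw [← hssdef]
  dsimp only
  rw [hget0, hgetN, ← hlen]
  simp only [hminD, hmaxD]
  by_cases hc1 : 1 < ss.length
  · simp only [if_pos hc1]
    have hfid : (fun (b s : Int) => max b
        (PySem.Int.floordiv ((PySem.List.min? (List.filter (fun t => decide (s < t)) c) fun x => x).getD s - s) 2))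
        = fun (b s : Int) => max b (pvGap c s) := rfl
    rw [hfid]
    set mids := List.map (fun i => PySem.List.pyGetD ss i 0 - PySem.List.pyGetD ss (i - 1) 0)
      (PySem.List.pyRange 1 (ss.length : Int)) with hmidsdef
    have hmids : mids = (List.range (ss.length - 1)).map (fun k => ss[k+1]! - ss[k]!) := by
      rw [hmidsdef, PySem.List.pyRange_one]
      rw [show ((ss.length : Int) - 1).toNat = ss.length - 1 by omega]
      rw [List.map_map]
      apply List.map_congr_left
      intro k hk
      rw [List.mem_range] at hk
      simp only [Function.comp_apply]
      rw [PySem.List.pyGetD_of_nonneg ss 0 (by positivity : (0:Int) ≤ 1 + (k:Int))]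
      rw [show (1 : Int) + (k : Int) - 1 = (k : Int) by ring]
      rw [PySem.List.pyGetD_of_nonneg ss 0 (by positivity : (0:Int) ≤ (k:Int))]
      rw [show ((1:Int) + (k:Int)).toNat = k + 1 by omega, show ((k:Int)).toNat = k by omega]
      rw [List.getD_eq_getElem ss 0 (by omega), List.getD_eq_getElem ss 0 (by omega)]
      rw [getElem!_pos ss (k+1) (by omega), getElem!_pos ss k (by omega)]
    have hmne : mids ≠ [] := by
      apply List.ne_nil_of_length_pos
      rw [hmids, List.length_map, List.length_range]
      omega
    cases hmaxq : PySem.List.max? mids (fun x => x) with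
    | none => exact absurd ((PySem.List.max?_eq_none_iff _ _).1 hmaxq) hmne
    | some M =>
    have hMmem' := PySem.List.max?_mem hmaxq
    have hMub : ∀ y ∈ mids, y ≤ M := PySem.List.max?_isMax hmaxq
    have hmem_mids : ∀ z, z ∈ mids ↔ ∃ k, k + 1 < ss.length ∧ z = ss[k+1]! - ss[k]! := by
      intro z
      rw [hmids]
      simp only [List.mem_map, List.mem_range]
      constructor
      · rintro ⟨k, hk, rfl⟩; exact ⟨k, by omega, rfl⟩
      · rintro ⟨k, hk, rfl⟩; exact ⟨k, by omega, rfl⟩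
    have hM0 : 0 ≤ M := by
      obtain ⟨k, hk, hv⟩ := (hmem_mids M).1 hMmem'
      have := hmono k (k+1) (by omega) hk (by omega)
      omega
    have hfd0 : PySem.Int.floordiv 0 2 = 0 := by decide
    have hub : ∀ s ∈ c, pvGap c s ≤ PySem.Int.floordiv M 2 := by
      intro s hs
      unfold pvGap
      cases hfm : PySem.List.min? (List.filter (fun t => decide (s < t)) c) (fun x => x) with
      | none =>
        simp only [Option.getD_none]
        rw [sub_self, hfd0]
        rw [← hfd0]
        exact fd2_mono hM0
      | some t0 =>
        simp only [Option.getD_some]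
        have ht0f := PySem.List.min?_mem hfm
        rw [List.mem_filter] at ht0f
        have hst0 : s < t0 := by simpa using ht0f.2
        have hsss : s ∈ ss := (hmemiff s).2 hs
        have ht0ss : t0 ∈ ss := (hmemiff t0).2 ht0f.1
        obtain ⟨k, hk1, hks, hks1⟩ := exists_adjacent_straddle hpw ht0ss hst0 ⟨s, hsss, le_refl s⟩
        have hk1mem : ss[k+1]! ∈ List.filter (fun t => decide (s < t)) c := by
          rw [List.mem_filter]
          exact ⟨hidxmem _ hk1, by simpa using hks1⟩
        have ht0le : t0 ≤ ss[k+1]! := PySem.List.min?_isMin hfm _ hk1mem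
        have hdm : ss[k+1]! - ss[k]! ≤ M := hMub _ ((hmem_mids _).2 ⟨k, hk1, rfl⟩)
        exact fd2_mono (by omega)
    have hattain : ∃ s ∈ c, pvGap c s = PySem.Int.floordiv M 2 := by
      by_cases hMpos : 0 < M
      · obtain ⟨k, hk1, hMv⟩ := (hmem_mids M).1 hMmem'
        refine ⟨ss[k]!, hidxmem k (by omega), ?_⟩
        unfold pvGap
        have hlt : ss[k]! < ss[k+1]! := by omega
        have hfmem : ss[k+1]! ∈ List.filter (fun t => decide (ss[k]! < t)) c := by
          rw [List.mem_filter]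
          exact ⟨hidxmem _ hk1, by simpa using hlt⟩
        cases hfm : PySem.List.min? (List.filter (fun t => decide (ss[k]! < t)) c) (fun x => x) with
        | none =>
          rw [PySem.List.min?_eq_none_iff] at hfm
          rw [hfm] at hfmem
          cases hfmem
        | some t0 =>
          have ht0mem := PySem.List.min?_mem hfm
          rw [List.mem_filter] at ht0mem
          have hst0 : ss[k]! < t0 := by simpa using ht0mem.2
          have hle : t0 ≤ ss[k+1]! := PySem.List.min?_isMin hfm _ hfmem
          obtain ⟨i, hi, hiv⟩ := hmemidx t0 ht0mem.1
          have hki : k < i := by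
            rcases Nat.lt_or_ge k i with hlt | hge
            · exact hlt
            · exact absurd (hmono i k hi (by omega) hge) (by omega)
          have hge : ss[k+1]! ≤ t0 := by
            rw [← hiv]
            exact hmono (k+1) i hk1 hi (by omega)
          simp only [Option.getD_some]
          rw [hMv]
          congr 1
          omega
      · have hM00 : M = 0 := by omega
        have hadj : ∀ k, k + 1 < ss.length → ss[k+1]! = ss[k]! := by
          intro k hk
          have h1 := hMub _ ((hmem_mids _).2 ⟨k, hk, rfl⟩)
          have h2 := hmono k (k+1) (by omega) hk (by omega)
          omega
        have hconst : ∀ i, i < ss.length → ss[i]! = ss[0]! := by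
          intro i
          induction i with
          | zero => intro _; rfl
          | succ j ih => intro hj; rw [hadj j hj, ih (by omega)]
        refine ⟨ss[0]!, hidxmem 0 hlpos, ?_⟩
        unfold pvGap
        have hfe : List.filter (fun t => decide (ss[0]! < t)) c = [] := by
          rw [List.filter_eq_nil_iff]
          intro t ht
          obtain ⟨i, hi, hiv⟩ := hmemidx t ht
          have hcst := hconst i hi
          simp only [decide_eq_true_eq]
          omega
        rw [hfe]
        have hnone : PySem.List.min? ([] : List Int) (fun x => x) = none :=
          (PySem.List.min?_eq_none_iff _ _).2 rfl
        rw [hnone]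
        simp only [Option.getD_none]
        rw [sub_self, hM00, hfd0]
    simp only [Option.getD_some]
    apply le_antisymm
    · apply max_le
      · obtain ⟨s, hs, hgap⟩ := hattain
        rw [← hgap]
        exact foldl_max_mem_le _ _ _ hs
      · exact foldl_max_init_le _ _ _
    · rcases foldl_max_cases (fun s => pvGap c s) c (max ss[0]! (n - ss[ss.length - 1]! - 1)) with hf | ⟨s, hs, hf⟩
      · rw [hf]
        exact le_max_right _ _
      · rw [hf]
        exact le_trans (hub s hs) (le_max_left _ _)
  · simp only [if_neg hc1]

-- ===== VERDICT (by name: the statement is the Claim_ definition above) =====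
theorem flatlandSpaceStations_spec : Claim_equal_flatlandSpaceStations := by
  intro n c _ hpre
  exact pv_main n c hpre
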